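-- pv_equiv track=rewrite | github.com/machine-biophotonics/AI4AMR | 2_effnet_model/moa_k19/generate_confusion_matrices.py | get_pathway
-- ===== SOURCE A (Python) =====
-- def get_pathway(label):
--     PATHWAYS = {
--         'Cell wall': ['mrcA', 'mrcB', 'mrdA', 'ftsI', 'murA', 'murC'],
--         'LPS': ['lpxA', 'lpxC', 'lptA', 'lptC', 'msbA'],
--         'DNA': ['gyrA', 'gyrB', 'parC', 'parE', 'dnaB', 'dnaE'],
--         'Transcription': ['rpoA', 'rpoB', 'rplA', 'rplC', 'rpsA', 'rpsL'],
--         'Metabolism': ['folA', 'folP', 'secA', 'secY'],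
--         'Cell division': ['ftsZ'],
--     }
--     gene_to_pathway = {}
--     for pathway, genes in PATHWAYS.items():
--         for gene in genes:
--             gene_to_pathway[gene] = pathway
--
--     if label == 'WT':
--         return 'Control'
--     gene = label.rsplit('_', 1)[0] if '_' in label else label
--     return gene_to_pathway.get(gene, 'Unknown')
-- ===== SOURCE B (Python) =====
-- def get_pathway(label):
--     # gene -> pathway as a SORTED array of pairs, searched by hand-rolled binary search
--     GENES = [
--         ('dnaB', 'DNA'), ('dnaE', 'DNA'), ('folA', 'Metabolism'), ('folP', 'Metabolism'),
--         ('ftsI', 'Cell wall'), ('ftsZ', 'Cell division'), ('gyrA', 'DNA'), ('gyrB', 'DNA'),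
--         ('lptA', 'LPS'), ('lptC', 'LPS'), ('lpxA', 'LPS'), ('lpxC', 'LPS'),
--         ('mrcA', 'Cell wall'), ('mrcB', 'Cell wall'), ('mrdA', 'Cell wall'), ('msbA', 'LPS'),
--         ('murA', 'Cell wall'), ('murC', 'Cell wall'), ('parC', 'DNA'), ('parE', 'DNA'),
--         ('rplA', 'Transcription'), ('rplC', 'Transcription'), ('rpoA', 'Transcription'),
--         ('rpoB', 'Transcription'), ('rpsA', 'Transcription'), ('rpsL', 'Transcription'),
--         ('secA', 'Metabolism'), ('secY', 'Metabolism'),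
--     ]
--     if label == 'WT':
--         return 'Control'
--     gene = label.rsplit('_', 1)[0] if '_' in label else label
--     lo, hi = 0, len(GENES)
--     while lo < hi:
--         mid = (lo + hi) // 2
--         k, p = GENES[mid]
--         if k == gene:
--             return p
--         if k < gene:
--             lo = mid + 1
--         else:
--             hi = mid
--     return 'Unknown'
-- ===== Notes on version B (the rewrite author's own statement) =====
-- stated objective: alternative
-- what changed: Replaces A's build-an-inverse-dict-then-hash-lookup with a literal sorted gene table searched by a hand-rolled binary search (lo/hi while loop), correct because each gene occurs in exactly one pathway list.
import Mathlib
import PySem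

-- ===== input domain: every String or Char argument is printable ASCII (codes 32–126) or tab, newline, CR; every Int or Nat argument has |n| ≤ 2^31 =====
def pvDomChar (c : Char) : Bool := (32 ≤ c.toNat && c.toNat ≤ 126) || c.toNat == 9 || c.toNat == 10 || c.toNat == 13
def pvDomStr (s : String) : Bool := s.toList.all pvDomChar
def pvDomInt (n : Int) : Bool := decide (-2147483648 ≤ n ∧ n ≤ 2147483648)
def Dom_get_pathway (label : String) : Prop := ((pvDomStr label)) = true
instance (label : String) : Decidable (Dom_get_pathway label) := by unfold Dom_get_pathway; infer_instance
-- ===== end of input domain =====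

-- B replaces A's inverse-dict construction and hash lookup by a literal sorted gene table searched with a hand-rolled binary search (alternative algorithm, same result because every gene belongs to exactly one pathway).

-- the PATHWAYS dict literal, as an insertion-ordered association list (A's constant)
def pvPATHWAYS : List (String × List String) :=
  [("Cell wall", ["mrcA", "mrcB", "mrdA", "ftsI", "murA", "murC"]),
   ("LPS", ["lpxA", "lpxC", "lptA", "lptC", "msbA"]),
   ("DNA", ["gyrA", "gyrB", "parC", "parE", "dnaB", "dnaE"]),
   ("Transcription", ["rpoA", "rpoB", "rplA", "rplC", "rpsA", "rpsL"]),
   ("Metabolism", ["folA", "folP", "secA", "secY"]),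
   ("Cell division", ["ftsZ"])]

-- "label.rsplit('_', 1)[0] if '_' in label else label", ported by hand (same line in both sources):
-- when '_' occurs in label, rsplit('_', 1)[0] is exactly label[:label.rfind('_')]
def pvGene (label : String) : String :=
  if PySem.Str.isIn "_" label then PySem.Str.slice label none (some (PySem.Str.rfind label "_")) else label

-- ===== PORT A =====
def get_pathway (label : String) : String :=
  let gene_to_pathway : PySem.Dict String String :=
    pvPATHWAYS.foldl (fun d pg => pg.2.foldl (fun d g => d.insert g pg.1) d) PySem.Dict.empty
  if label = "WT" then "Control"
  else gene_to_pathway.getD (pvGene label) "Unknown"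

-- ===== PORT B =====
-- B's GENES constant: the 28 (gene, pathway) pairs sorted by gene name
def pvTABLE : List (String × String) :=
  [("dnaB", "DNA"), ("dnaE", "DNA"), ("folA", "Metabolism"), ("folP", "Metabolism"),
   ("ftsI", "Cell wall"), ("ftsZ", "Cell division"), ("gyrA", "DNA"), ("gyrB", "DNA"),
   ("lptA", "LPS"), ("lptC", "LPS"), ("lpxA", "LPS"), ("lpxC", "LPS"),
   ("mrcA", "Cell wall"), ("mrcB", "Cell wall"), ("mrdA", "Cell wall"), ("msbA", "LPS"),
   ("murA", "Cell wall"), ("murC", "Cell wall"), ("parC", "DNA"), ("parE", "DNA"),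
   ("rplA", "Transcription"), ("rplC", "Transcription"), ("rpoA", "Transcription"),
   ("rpoB", "Transcription"), ("rpsA", "Transcription"), ("rpsL", "Transcription"),
   ("secA", "Metabolism"), ("secY", "Metabolism")]

-- B's while-loop binary search, with fuel only as a totality guard (the interval shrinks
-- strictly each step, so fuel = table length is never exhausted before lo ≥ hi).
-- Python's 'k < gene' on strings is lexicographic on code points: exactly '<' on the Char lists.
def pvBSearch (gene : String) : Nat → Nat → Nat → String
  | 0, _, _ => "Unknown"
  | fuel + 1, lo, hi =>
    if lo < hi then
      let mid := (lo + hi) / 2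
      let kp := pvTABLE.getD mid ("", "")
      if kp.1 = gene then kp.2
      else if kp.1.toList < gene.toList then pvBSearch gene fuel (mid + 1) hi
      else pvBSearch gene fuel lo mid
    else "Unknown"

def get_pathway_alt (label : String) : String :=
  if label = "WT" then "Control"
  else pvBSearch (pvGene label) pvTABLE.length 0 pvTABLE.length

-- ===== PRECONDITION & SPEC =====
def Spec_get_pathway (label : String) (out : String) : Prop := out = get_pathway_alt label
instance (label : String) (out : String) : Decidable (Spec_get_pathway label out) := by unfold Spec_get_pathway; infer_instance

-- ===== CLAIM (what is proved, stated in full; the proofs are below) =====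
def Claim_equal_get_pathway : Prop := ∀ (label : String), Dom_get_pathway label → Spec_get_pathway label (get_pathway label)

-- ===== LEMMAS AND PROOFS =====
-- A's double foldl builds exactly this flattened association list (all 28 keys are distinct)
def pvFLAT : List (String × String) :=
  [("mrcA", "Cell wall"), ("mrcB", "Cell wall"), ("mrdA", "Cell wall"), ("ftsI", "Cell wall"),
   ("murA", "Cell wall"), ("murC", "Cell wall"),
   ("lpxA", "LPS"), ("lpxC", "LPS"), ("lptA", "LPS"), ("lptC", "LPS"), ("msbA", "LPS"),
   ("gyrA", "DNA"), ("gyrB", "DNA"), ("parC", "DNA"), ("parE", "DNA"), ("dnaB", "DNA"), ("dnaE", "DNA"),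
   ("rpoA", "Transcription"), ("rpoB", "Transcription"), ("rplA", "Transcription"),
   ("rplC", "Transcription"), ("rpsA", "Transcription"), ("rpsL", "Transcription"),
   ("folA", "Metabolism"), ("folP", "Metabolism"), ("secA", "Metabolism"), ("secY", "Metabolism"),
   ("ftsZ", "Cell division")]

theorem dictA_eq :
    (pvPATHWAYS.foldl (fun d pg => pg.2.foldl (fun d g => d.insert g pg.1) d)
      (PySem.Dict.empty : PySem.Dict String String)) = PySem.Dict.mk pvFLAT := by decide

theorem get?_mk_none (g : String) : ∀ L : List (String × String),
    (∀ kp ∈ L, g ≠ kp.1) → (PySem.Dict.mk L).get? g = none := by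
  intro L h
  induction L with
  | nil => simp [PySem.Dict.get?]
  | cons hd t ih =>
    have h1 : g ≠ hd.1 := h hd (by simp)
    rw [PySem.Dict.get?_mk_cons, if_neg (by simpa using (Ne.symm h1))]
    exact ih (fun kp hkp => h kp (List.mem_cons_of_mem _ hkp))

theorem bsearch_unknown (g : String) (h : ∀ kp ∈ pvTABLE, g ≠ kp.1) :
    ∀ fuel lo hi, hi ≤ pvTABLE.length → pvBSearch g fuel lo hi = "Unknown" := by
  intro fuel
  induction fuel with
  | zero => intro lo hi _; rfl
  | succ n ih =>
    intro lo hi hhi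
    unfold pvBSearch
    by_cases hlh : lo < hi
    · have hmid : (lo + hi) / 2 < pvTABLE.length := by omega
      have hget : pvTABLE.getD ((lo + hi) / 2) ("", "") = pvTABLE[(lo + hi) / 2] :=
        List.getD_eq_getElem _ _ hmid
      have hne : (pvTABLE[(lo + hi) / 2]'hmid).1 ≠ g :=
        Ne.symm (h _ (List.getElem_mem hmid))
      simp only [hlh, if_true, hget, if_neg hne]
      split
      · exact ih _ _ hhi
      · exact ih _ _ (by omega)
    · simp [hlh]

theorem core (g : String) :
    (pvPATHWAYS.foldl (fun d pg => pg.2.foldl (fun d x => d.insert x pg.1) d)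
      (PySem.Dict.empty : PySem.Dict String String)).getD g "Unknown" =
      pvBSearch g pvTABLE.length 0 pvTABLE.length := by
  rw [dictA_eq]
  by_cases hg : g ∈ pvTABLE.map Prod.fst
  · simp only [pvTABLE, List.map_cons, List.map_nil, List.mem_cons, List.not_mem_nil, or_false] at hg
    rcases hg with rfl|rfl|rfl|rfl|rfl|rfl|rfl|rfl|rfl|rfl|rfl|rfl|rfl|rfl|rfl|rfl|rfl|rfl|rfl|rfl|rfl|rfl|rfl|rfl|rfl|rfl|rfl|rfl <;> decide
  · have hT : ∀ kp ∈ pvTABLE, g ≠ kp.1 :=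
      fun kp hkp hgk => hg (hgk ▸ List.mem_map_of_mem hkp)
    have hsub : ∀ x ∈ pvFLAT.map Prod.fst, x ∈ pvTABLE.map Prod.fst := by decide
    have hF : ∀ kp ∈ pvFLAT, g ≠ kp.1 :=
      fun kp hkp hgk => hg (hsub _ (hgk ▸ List.mem_map_of_mem hkp))
    rw [PySem.Dict.getD_eq_get?_getD, get?_mk_none g pvFLAT hF,
      bsearch_unknown g hT _ 0 _ le_rfl]
    rfl

-- ===== VERDICT (by name: the statement is the Claim_ definition above) =====
theorem get_pathway_spec : Claim_equal_get_pathway := by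
  intro label _
  unfold Spec_get_pathway get_pathway get_pathway_alt
  by_cases h : label = "WT"
  · simp [h]
  · simp only [h, if_false]
    exact core (pvGene label)
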